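-- pv_equiv track=rewrite | github.com/miaohancheng/llm_stock_report | scripts/build_pages.py | _filter_cases_recent_days
-- ===== SOURCE A (Python) =====
-- def _filter_cases_recent_days(cases: list[dict], keep_days: int) -> list[dict]:
--     if keep_days <= 0:
--         return list(cases)
--     unique_dates: list[str] = []
--     seen: set[str] = set()
--     for item in cases:
--         day = str(item.get("date", "")).strip()
--         if not day or day in seen:
--             continue
--         seen.add(day)
--         unique_dates.append(day)
--     keep = set(unique_dates[:keep_days])
--     return [item for item in cases if str(item.get("date", "")).strip() in keep]
-- ===== SOURCE B (Python) =====
-- def _filter_cases_recent_days(cases: list[dict], keep_days: int) -> list[dict]: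
--     if keep_days <= 0:
--         return list(cases)
--     accepted: set[str] = set()
--     result: list[dict] = []
--     for item in cases:
--         day = str(item.get("date", "")).strip()
--         if day in accepted:
--             result.append(item)
--         elif day and len(accepted) < keep_days:
--             accepted.add(day)
--             result.append(item)
--     return result
-- ===== Notes on version B (the rewrite author's own statement) =====
-- stated objective: simpler
-- what changed: Replaces A's two passes (collect unique dates, build keep-set, then filter) with a single pass that maintains the accepted-date set and appends kept items directly.
import Mathlib
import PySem

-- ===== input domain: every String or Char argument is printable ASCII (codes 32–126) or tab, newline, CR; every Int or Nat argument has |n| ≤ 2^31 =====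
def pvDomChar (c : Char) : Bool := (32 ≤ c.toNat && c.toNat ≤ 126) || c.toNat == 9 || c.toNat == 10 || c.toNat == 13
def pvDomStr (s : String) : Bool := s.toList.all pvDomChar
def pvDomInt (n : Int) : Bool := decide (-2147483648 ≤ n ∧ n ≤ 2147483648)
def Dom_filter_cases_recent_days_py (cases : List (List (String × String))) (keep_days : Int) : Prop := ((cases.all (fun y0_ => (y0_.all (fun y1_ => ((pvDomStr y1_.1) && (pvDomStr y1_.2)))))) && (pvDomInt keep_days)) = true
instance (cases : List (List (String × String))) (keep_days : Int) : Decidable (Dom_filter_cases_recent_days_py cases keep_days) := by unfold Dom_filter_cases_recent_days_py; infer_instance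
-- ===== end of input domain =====

-- B merges A's two passes (collect unique dates, build keep-set, filter) into one pass that
-- maintains the accepted-date set and appends kept items directly; same cost, simpler shape.


-- ===== PORT A =====
-- day = str(item.get("date", "")).strip()
def pvDay (item : List (String × String)) : String :=
  PySem.Str.strip (PySem.Dict.getD (PySem.Dict.mk item) "date" "")

-- one iteration of A's first loop, state = (unique_dates, seen)
def pvStepA (st : List String × PySem.Set String) (item : List (String × String)) :
    List String × PySem.Set String :=
  let day := pvDay item
  if day == "" || PySem.Set.contains st.2 day then st
  else (st.1 ++ [day], PySem.Set.add st.2 day)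

def filter_cases_recent_days_py (cases : List (List (String × String))) (keep_days : Int) : List (List (String × String)) :=
  if keep_days ≤ 0 then cases
  else
    -- first loop over cases: unique_dates / seen
    let st := cases.foldl pvStepA ([], PySem.Set.empty)
    -- keep = set(unique_dates[:keep_days]); keep_days > 0 here, so the slice is `take`
    let keep : PySem.Set String := PySem.Set.ofList (st.1.take keep_days.toNat)
    -- second loop: the list comprehension
    cases.filter (fun item => PySem.Set.contains keep (pvDay item))

-- ===== PORT B =====
-- one iteration of B's single loop, state = (accepted, result)
def pvStepB (keep_days : Int) (st : PySem.Set String × List (List (String × String)))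
    (item : List (String × String)) : PySem.Set String × List (List (String × String)) :=
  let day := pvDay item
  if PySem.Set.contains st.1 day then (st.1, st.2 ++ [item])
  else if day != "" && decide ((PySem.Set.len st.1 : Int) < keep_days) then
    (PySem.Set.add st.1 day, st.2 ++ [item])
  else st

def filter_cases_recent_days_py_alt (cases : List (List (String × String))) (keep_days : Int) : List (List (String × String)) :=
  if keep_days ≤ 0 then cases
  else (cases.foldl (pvStepB keep_days) (PySem.Set.empty, [])).2

-- ===== PRECONDITION & SPEC =====
def Spec_filter_cases_recent_days_py (cases : List (List (String × String))) (keep_days : Int) (out : List (List (String × String))) : Prop := out = filter_cases_recent_days_py_alt cases keep_days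
instance (cases : List (List (String × String))) (keep_days : Int) (out : List (List (String × String))) : Decidable (Spec_filter_cases_recent_days_py cases keep_days out) := by unfold Spec_filter_cases_recent_days_py; infer_instance

-- ===== CLAIM (what is proved, stated in full; the proofs are below) =====
def Claim_equal_filter_cases_recent_days_py : Prop := ∀ (cases : List (List (String × String))) (keep_days : Int), Dom_filter_cases_recent_days_py cases keep_days → Spec_filter_cases_recent_days_py cases keep_days (filter_cases_recent_days_py cases keep_days)

-- ===== LEMMAS AND PROOFS =====

-- the new unique nonempty days of xs, given that `seen` is already seen
def pvUniq (seen : PySem.Set String) : List (List (String × String)) → List String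
  | [] => []
  | it :: xs =>
    if pvDay it == "" || PySem.Set.contains seen (pvDay it) then pvUniq seen xs
    else pvDay it :: pvUniq (PySem.Set.add seen (pvDay it)) xs

theorem pvStepA_eq (acc : List String) (seen : PySem.Set String) (it : List (String × String)) :
    pvStepA (acc, seen) it =
      if pvDay it == "" || PySem.Set.contains seen (pvDay it) then (acc, seen)
      else (acc ++ [pvDay it], PySem.Set.add seen (pvDay it)) := rfl

theorem pvStepB_eq (k : Int) (seen : PySem.Set String) (out : List (List (String × String)))
    (it : List (String × String)) :
    pvStepB k (seen, out) it =
      if PySem.Set.contains seen (pvDay it) then (seen, out ++ [it])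
      else if pvDay it != "" && decide ((PySem.Set.len seen : Int) < k) then
        (PySem.Set.add seen (pvDay it), out ++ [it])
      else (seen, out) := rfl

theorem pv_mem_shift {α : Type} (s : List α) (d : α) (t : List α) (y : α) :
    y ∈ s ++ d :: t ↔ y ∈ (s ++ [d]) ++ t := by
  simp only [List.mem_append, List.mem_cons, List.not_mem_nil, or_false]
  tauto

theorem pvUniq_ne_empty (seen : PySem.Set String) (xs : List (List (String × String))) :
    "" ∉ pvUniq seen xs := by
  induction xs generalizing seen with
  | nil => simp [pvUniq]
  | cons it xs ih =>
    simp only [pvUniq]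
    split
    · exact ih seen
    · rename_i h
      simp only [List.mem_cons, not_or]
      refine ⟨?_, ih _⟩
      intro hc; rw [← hc] at h; simp at h

-- A's first fold builds exactly pvUniq
theorem pvA_fold (xs : List (List (String × String))) :
    ∀ (acc : List String) (seen : PySem.Set String),
    (xs.foldl pvStepA (acc, seen)).1 = acc ++ pvUniq seen xs := by
  induction xs with
  | nil => intro acc seen; simp [pvUniq]
  | cons it xs ih =>
    intro acc seen
    simp only [List.foldl_cons, pvUniq, pvStepA_eq]
    split
    · exact ih acc seen
    · rw [ih (acc ++ [pvDay it]) (PySem.Set.add seen (pvDay it))]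
      simp

-- B's fold, second component, characterised as a filter (0 < k)
theorem pvB_fold (k : Int) (hk : 0 < k) (xs : List (List (String × String))) :
    ∀ (seen : PySem.Set String) (out : List (List (String × String))),
    "" ∉ seen → seen.length ≤ k.toNat → seen.Nodup →
    (xs.foldl (pvStepB k) (seen, out)).2
    = out ++ xs.filter (fun it => decide (pvDay it ∈ seen ++ (pvUniq seen xs).take (k.toNat - seen.length))) := by
  induction xs with
  | nil => intro seen out _ _ _; simp
  | cons it xs ih =>
    intro seen out hne hlen hnd
    simp only [List.foldl_cons, List.filter_cons, pvStepB_eq]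
    by_cases hmem : pvDay it ∈ seen
    · -- day already accepted: kept, uniq unchanged
      have hc : PySem.Set.contains seen (pvDay it) = true := by
        simpa using (PySem.Set.contains_iff seen (pvDay it)).2 hmem
      have huq : pvUniq seen (it :: xs) = pvUniq seen xs := by
        simp only [pvUniq, hc, Bool.or_true, if_true]
      rw [huq]
      simp only [hc, if_true]
      rw [ih seen (out ++ [it]) hne hlen hnd]
      have : pvDay it ∈ seen ++ (pvUniq seen xs).take (k.toNat - seen.length) :=
        List.mem_append_left _ hmem
      simp [this]
    · have hc : PySem.Set.contains seen (pvDay it) = false := by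
        simp [PySem.Set.contains_eq_listContains]; exact hmem
      simp only [hc, Bool.false_eq_true, if_false]
      by_cases hemp : pvDay it = ""
      · -- empty day: skipped, and not in the filter set
        have hbeq : (pvDay it == "") = true := by simp [hemp]
        have huq : pvUniq seen (it :: xs) = pvUniq seen xs := by
          simp only [pvUniq, hbeq, Bool.true_or, if_true]
        rw [huq]
        have hbe : (pvDay it != "") = false := by simp [hemp]
        simp only [hbe, Bool.false_and, Bool.false_eq_true, if_false]
        rw [ih seen out hne hlen hnd]
        have hnotin : pvDay it ∉ seen ++ (pvUniq seen xs).take (k.toNat - seen.length) := by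
          rw [hemp]
          intro hmem'
          rcases List.mem_append.1 hmem' with h | h
          · exact hne h
          · exact pvUniq_ne_empty seen xs (List.mem_of_mem_take h)
        simp [hnotin]
      · -- new nonempty day
        have hbe : (pvDay it != "") = true := by simp [hemp]
        have hbeq : (pvDay it == "") = false := by simp [hemp]
        have huq : pvUniq seen (it :: xs) = pvDay it :: pvUniq (PySem.Set.add seen (pvDay it)) xs := by
          simp only [pvUniq, hbeq, hc, Bool.or_self, Bool.false_eq_true, if_false]
        have hadd : PySem.Set.add seen (pvDay it) = seen ++ [pvDay it] :=
          PySem.Set.add_of_not_mem hmem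
        have hlen' : (PySem.Set.add seen (pvDay it)).length = seen.length + 1 := by
          rw [hadd]; simp
        by_cases hlt : (seen.length : Int) < k
        · -- accepted
          have hlenB : decide ((PySem.Set.len seen : Int) < k) = true :=
            decide_eq_true (by simpa [PySem.Set.len] using hlt)
          simp only [hbe, Bool.true_and, hlenB, if_true]
          rw [huq]
          have htk : (pvDay it :: pvUniq (PySem.Set.add seen (pvDay it)) xs).take (k.toNat - seen.length)
              = pvDay it :: (pvUniq (PySem.Set.add seen (pvDay it)) xs).take (k.toNat - (PySem.Set.add seen (pvDay it)).length) := by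
            have hidx : k.toNat - seen.length = (k.toNat - (PySem.Set.add seen (pvDay it)).length) + 1 := by
              rw [hlen']; omega
            rw [hidx, List.take_succ_cons]
          rw [htk]
          have hcond : decide (pvDay it ∈ seen ++ pvDay it :: (pvUniq (PySem.Set.add seen (pvDay it)) xs).take (k.toNat - (PySem.Set.add seen (pvDay it)).length)) = true := by
            simp
          simp only [hcond, if_true]
          have hfc : ∀ x ∈ xs,
              (decide (pvDay x ∈ seen ++ pvDay it :: (pvUniq (PySem.Set.add seen (pvDay it)) xs).take (k.toNat - (PySem.Set.add seen (pvDay it)).length)))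
              = (decide (pvDay x ∈ PySem.Set.add seen (pvDay it) ++ (pvUniq (PySem.Set.add seen (pvDay it)) xs).take (k.toNat - (PySem.Set.add seen (pvDay it)).length))) := by
            intro x _
            apply decide_eq_decide.2
            rw [hadd]
            exact pv_mem_shift seen (pvDay it) _ (pvDay x)
          rw [List.filter_congr hfc]
          rw [ih (PySem.Set.add seen (pvDay it)) (out ++ [it])
              (by rw [hadd]; intro h; rcases List.mem_append.1 h with h | h
                  · exact hne h
                  · simp at h; exact hemp h)
              (by rw [hlen']; omega)
              (by rw [hadd]
                  simp [List.nodup_append, hnd]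
                  intro x hx h; rw [h] at hx; exact hmem hx)]
          simp
        · -- set full: skipped, take is empty
          have hlenB : decide ((PySem.Set.len seen : Int) < k) = false :=
            decide_eq_false (by simpa [PySem.Set.len] using hlt)
          simp only [hlenB, Bool.and_false, Bool.false_eq_true, if_false]
          have hz : k.toNat - seen.length = 0 := by omega
          rw [ih seen out hne hlen hnd, huq, hz]
          simp [hmem]

theorem pv_main (cases : List (List (String × String))) (k : Int) :
    filter_cases_recent_days_py cases k = filter_cases_recent_days_py_alt cases k := by
  unfold filter_cases_recent_days_py filter_cases_recent_days_py_alt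
  by_cases hk : k ≤ 0
  · simp [hk]
  · simp only [hk, if_false]
    have hk' : 0 < k := by omega
    rw [pvB_fold k hk' cases PySem.Set.empty [] (by simp [PySem.Set.empty]) (by simp [PySem.Set.empty]) (by simp [PySem.Set.empty])]
    rw [pvA_fold cases [] PySem.Set.empty]
    simp only [List.nil_append]
    apply List.filter_congr
    intro it _
    simp [PySem.Set.contains_eq_listContains, PySem.Set.mem_ofList, PySem.Set.empty]

-- ===== VERDICT (by name: the statement is the Claim_ definition above) =====
theorem filter_cases_recent_days_py_spec : Claim_equal_filter_cases_recent_days_py := by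
  intro cases keep_days _
  unfold Spec_filter_cases_recent_days_py
  exact pv_main cases keep_days
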